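-- pv_equiv track=rewrite | github.com/rudrasatani13/quantum-website-analysis | utils/ai_detector.py | _count_repeated_patterns
-- ===== SOURCE A (Python) =====
-- def _count_repeated_patterns(content: str) -> int:
--     """Count repeated patterns in content"""
--     # Look for repeated substrings of length 3 or more
--     pattern_count = 0
--     seen_patterns = set()
--
--     for i in range(len(content) - 2):
--         for length in range(3, min(20, len(content) - i + 1)):
--             pattern = content[i:i+length]
--             if pattern in seen_patterns:
--                 continue
--
--             occurrences = content.count(pattern)
--             if occurrences > 1:
--                 pattern_count += occurrences - 1
--                 seen_patterns.add(pattern)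
--
--     return pattern_count
-- ===== SOURCE B (Python) =====
-- def _count_repeated_patterns(content: str) -> int:
--     """Count repeated patterns in content"""
--     n = len(content)
--     total = 0
--     for length in range(3, 20):
--         # one pass: group the start positions of every window of this length
--         positions = {}
--         for i in range(n - length + 1):
--             positions.setdefault(content[i:i + length], []).append(i)
--         # greedy left-to-right scan of the (ascending) positions reproduces
--         # str.count's non-overlapping occurrence count without rescanning content
--         for pos_list in positions.values():
--             count = 0
--             next_free = 0
--             for i in pos_list:
--                 if i >= next_free:
--                     count += 1
--                     next_free = i + length
--             if count > 1:
--                 total += count - 1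
--     return total
-- ===== Notes on version B (the rewrite author's own statement) =====
-- stated objective: faster
-- what changed: Instead of scanning the whole string with content.count for every window (O(n^2)), B makes one pass per length (3..19) grouping window start positions in a dict, then recovers each pattern's non-overlapping occurrence count by a greedy scan of its ascending position list.
import Mathlib
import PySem

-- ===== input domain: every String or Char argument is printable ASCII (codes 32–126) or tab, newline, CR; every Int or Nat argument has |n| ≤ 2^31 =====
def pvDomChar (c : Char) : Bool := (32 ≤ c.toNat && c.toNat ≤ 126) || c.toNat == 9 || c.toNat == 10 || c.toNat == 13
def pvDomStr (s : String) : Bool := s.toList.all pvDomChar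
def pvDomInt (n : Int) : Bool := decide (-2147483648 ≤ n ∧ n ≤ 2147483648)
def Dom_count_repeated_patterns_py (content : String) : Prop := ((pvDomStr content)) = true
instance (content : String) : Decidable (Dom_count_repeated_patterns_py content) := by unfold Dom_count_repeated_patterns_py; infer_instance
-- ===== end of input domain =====

-- B replaces A's per-window rescans of the whole string (content.count) by one grouping pass
-- per length 3..19 (dict: window -> ascending start positions) plus a greedy scan of each
-- position list that yields the same non-overlapping occurrence count; objective: faster.


-- ===== PORT A =====
-- A's inner-loop body (the Python loop body, lifted to a named helper for the proofs)
def pvStepA (s : List Char) (st : Int × PySem.Set (List Char)) (pattern : List Char) :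
    Int × PySem.Set (List Char) :=
  if PySem.Set.contains st.2 pattern then st
  else
    let occurrences : Int := (PySem.Chars.count s pattern : Int)
    if 1 < occurrences then (st.1 + occurrences - 1, PySem.Set.add st.2 pattern)
    else st

-- A on the character list: the two nested `for` loops over ranges, with the seen-set state
def pvA (s : List Char) : Int :=
  ((PySem.List.pyRange 0 (PySem.Chars.len s - 2) 1).foldl
    (fun st i =>
      (PySem.List.pyRange 3 (min 20 (PySem.Chars.len s - i + 1)) 1).foldl
        (fun st length => pvStepA s st (PySem.Chars.slice s (some i) (some (i + length)))) st)
    ((0 : Int), (PySem.Set.empty : PySem.Set (List Char)))).1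

def count_repeated_patterns_py (content : String) : Int := pvA content.toList

-- ===== PORT B =====
-- B's greedy left-to-right scan of one ascending position list (the inner `for i in pos_list`)
def pvGreedy (length : Int) (pos : List Int) : Int :=
  (pos.foldl (fun st i => if st.2 ≤ i then (st.1 + 1, i + length) else st) ((0 : Int), (0 : Int))).1

-- B on the character list: per length, one grouping pass into a dict, then the greedy counts
def pvB (s : List Char) : Int :=
  (PySem.List.pyRange 3 20 1).foldl
    (fun total length =>
      let d := (PySem.List.pyRange 0 (PySem.Chars.len s - length + 1) 1).foldl
        (fun d i =>
          d.modify (PySem.Chars.slice s (some i) (some (i + length))) [] (· ++ [i]))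
        (PySem.Dict.empty : PySem.Dict (List Char) (List Int))
      d.values.foldl
        (fun total pos =>
          let c := pvGreedy length pos
          if 1 < c then total + (c - 1) else total) total)
    0

def count_repeated_patterns_py_alt (content : String) : Int := pvB content.toList

-- ===== PRECONDITION & SPEC =====
def Spec_count_repeated_patterns_py (content : String) (out : Int) : Prop := out = count_repeated_patterns_py_alt content
instance (content : String) (out : Int) : Decidable (Spec_count_repeated_patterns_py content out) := by unfold Spec_count_repeated_patterns_py; infer_instance

-- ===== CLAIM (what is proved, stated in full; the proofs are below) =====
def Claim_equal_count_repeated_patterns_py : Prop := ∀ (content : String), Dom_count_repeated_patterns_py content → Spec_count_repeated_patterns_py content (count_repeated_patterns_py content)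

-- ===== LEMMAS AND PROOFS =====

-- the weight every repeated pattern contributes: count-1 if it occurs more than once, else 0
def pvF (s p : List Char) : Int :=
  if 1 < (PySem.Chars.count s p : Int) then (PySem.Chars.count s p : Int) - 1 else 0

-- the patterns A enumerates, in A's order
def pvAllA (s : List Char) : List (List Char) :=
  (PySem.List.pyRange 0 (PySem.Chars.len s - 2) 1).flatMap (fun i =>
    (PySem.List.pyRange 3 (min 20 (PySem.Chars.len s - i + 1)) 1).map
      (fun length => PySem.Chars.slice s (some i) (some (i + length))))

-- the windows of one length, in B's order
def pvSubsAt (s : List Char) (length : Int) : List (List Char) :=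
  (PySem.List.pyRange 0 (PySem.Chars.len s - length + 1) 1).map
    (fun i => PySem.Chars.slice s (some i) (some (i + length)))

-- A's loop state is determined by the multiset-free set of patterns processed so far:
-- the accumulator is the pvF-sum over the distinct processed patterns, the seen-set is
-- the set of processed patterns occurring more than once
theorem pv_seen_fold (s : List Char) (l : List (List Char)) : ∀ processed : List (List Char),
    l.foldl (pvStepA s)
      (((PySem.Set.ofList processed).map (pvF s)).sum,
        PySem.Set.ofList (processed.filter (fun p => decide (1 < (PySem.Chars.count s p : Int)))))
    = (((PySem.Set.ofList (processed ++ l)).map (pvF s)).sum,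
        PySem.Set.ofList ((processed ++ l).filter (fun p => decide (1 < (PySem.Chars.count s p : Int))))) := by
  induction l with
  | nil => intro processed; simp
  | cons x t ih =>
    intro processed
    have key : pvStepA s
        (((PySem.Set.ofList processed).map (pvF s)).sum,
          PySem.Set.ofList (processed.filter (fun p => decide (1 < (PySem.Chars.count s p : Int))))) x
        = (((PySem.Set.ofList (processed ++ [x])).map (pvF s)).sum,
            PySem.Set.ofList ((processed ++ [x]).filter (fun p => decide (1 < (PySem.Chars.count s p : Int))))) := by
      by_cases hP : 1 < PySem.Chars.count s x
      · have hPI : 1 < (PySem.Chars.count s x : Int) := by exact_mod_cast hP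
        by_cases hmem : x ∈ processed
        · have hf : x ∈ processed.filter (fun p => decide (1 < (PySem.Chars.count s p : Int))) :=
            List.mem_filter.mpr ⟨hmem, by simp [hP]⟩
          have h1 : PySem.Set.ofList (processed ++ [x]) = PySem.Set.ofList processed := by
            rw [PySem.Set.ofList_append_singleton]
            exact PySem.Set.add_of_mem ((PySem.Set.mem_ofList processed x).mpr hmem)
          have h2 : PySem.Set.ofList ((processed ++ [x]).filter
                (fun p => decide (1 < (PySem.Chars.count s p : Int))))
              = PySem.Set.ofList (processed.filter (fun p => decide (1 < (PySem.Chars.count s p : Int)))) := by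
            rw [List.filter_append, show ([x].filter (fun p => decide (1 < (PySem.Chars.count s p : Int)))) = [x] by simp [hP],
              PySem.Set.ofList_append_singleton]
            exact PySem.Set.add_of_mem ((PySem.Set.mem_ofList _ x).mpr hf)
          have hc : PySem.Set.contains
              (PySem.Set.ofList (processed.filter (fun p => decide (1 < (PySem.Chars.count s p : Int))))) x = true :=
            (PySem.Set.contains_iff _ x).mpr ((PySem.Set.mem_ofList _ x).mpr hf)
          rw [h1, h2]
          simp only [pvStepA]
          rw [hc]
          simp
        · have hf : x ∉ processed.filter (fun p => decide (1 < (PySem.Chars.count s p : Int))) := by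
            intro h; exact hmem (List.mem_filter.mp h).1
          have hc : PySem.Set.contains
              (PySem.Set.ofList (processed.filter (fun p => decide (1 < (PySem.Chars.count s p : Int))))) x = false := by
            rw [← Bool.not_eq_true]
            intro h
            exact hf ((PySem.Set.mem_ofList _ x).mp ((PySem.Set.contains_iff _ x).mp h))
          have h1 : PySem.Set.ofList (processed ++ [x]) = PySem.Set.ofList processed ++ [x] := by
            rw [PySem.Set.ofList_append_singleton]
            exact PySem.Set.add_of_not_mem (fun h => hmem ((PySem.Set.mem_ofList processed x).mp h))
          have h2 : PySem.Set.ofList ((processed ++ [x]).filter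
                (fun p => decide (1 < (PySem.Chars.count s p : Int))))
              = PySem.Set.add (PySem.Set.ofList (processed.filter (fun p => decide (1 < (PySem.Chars.count s p : Int))))) x := by
            rw [List.filter_append, show ([x].filter (fun p => decide (1 < (PySem.Chars.count s p : Int)))) = [x] by simp [hP],
              PySem.Set.ofList_append_singleton]
          rw [h1, h2]
          simp only [pvStepA]
          rw [hc]
          simp only [Bool.false_eq_true, if_false, List.map_append, List.sum_append,
            List.map_cons, List.map_nil, List.sum_cons, List.sum_nil, pvF, if_pos hPI]
          rw [Prod.mk.injEq]
          exact ⟨by ring, rfl⟩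
      · have h2 : (processed ++ [x]).filter (fun p => decide (1 < (PySem.Chars.count s p : Int)))
            = processed.filter (fun p => decide (1 < (PySem.Chars.count s p : Int))) := by
          rw [List.filter_append, show ([x].filter (fun p => decide (1 < (PySem.Chars.count s p : Int)))) = [] by simp; omega,
            List.append_nil]
        have h1 : ((PySem.Set.ofList (processed ++ [x])).map (pvF s)).sum
            = ((PySem.Set.ofList processed).map (pvF s)).sum := by
          by_cases hmem : x ∈ processed
          · rw [PySem.Set.ofList_append_singleton,
              PySem.Set.add_of_mem ((PySem.Set.mem_ofList processed x).mpr hmem)]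
          · rw [PySem.Set.ofList_append_singleton,
              PySem.Set.add_of_not_mem (fun h => hmem ((PySem.Set.mem_ofList processed x).mp h))]
            simp [pvF]
            omega
        rw [h1, h2]
        simp [pvStepA, hP]
    rw [List.foldl_cons, key, ih (processed ++ [x]), List.append_assoc]
    rfl

theorem pvA_eq_sum (s : List Char) :
    pvA s = ((PySem.Set.ofList (pvAllA s)).map (pvF s)).sum := by
  have h0 : pvA s = ((pvAllA s).foldl (pvStepA s) ((0 : Int), (PySem.Set.empty : PySem.Set (List Char)))).1 := by
    rw [pvA, pvAllA, List.foldl_flatMap]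
    simp only [List.foldl_map]
  rw [h0]
  have := pv_seen_fold s (pvAllA s) []
  simp only [List.nil_append] at this
  rw [show ((0 : Int), (PySem.Set.empty : PySem.Set (List Char)))
      = ((((PySem.Set.ofList ([] : List (List Char))).map (pvF s)).sum,
          PySem.Set.ofList (([] : List (List Char)).filter (fun p => decide (1 < (PySem.Chars.count s p : Int)))))) from rfl,
    this]

-- every window of length L really has L characters
theorem pv_len_of_mem_subs (s : List Char) (L : Int) (hL : 0 < L) :
    ∀ p ∈ pvSubsAt s L, p.length = L.toNat := by
  intro p hp
  simp only [pvSubsAt, List.mem_map, PySem.List.mem_pyRange_one, PySem.Chars.len_eq] at hp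
  obtain ⟨i, ⟨hi0, hi1⟩, rfl⟩ := hp
  have hiL : (0 : Int) ≤ i + L := by omega
  rw [PySem.Chars.slice_eq_listSlice, show i = ((i.toNat : Nat) : Int) by omega,
    show ((i.toNat : Nat) : Int) + L = (((i + L).toNat : Nat) : Int) by omega,
    PySem.List.slice_natCast]
  simp only [List.length_take, List.length_drop]
  omega

-- A and B enumerate the same patterns (different order, different grouping)
theorem pv_mem_allA_iff (s : List Char) (p : List Char) :
    p ∈ pvAllA s ↔ ∃ L, L ∈ PySem.List.pyRange 3 20 1 ∧ p ∈ pvSubsAt s L := by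
  simp only [pvAllA, pvSubsAt, List.mem_flatMap, List.mem_map, PySem.List.mem_pyRange_one]
  constructor
  · rintro ⟨i, ⟨hi0, hi1⟩, L, ⟨hL0, hL1⟩, rfl⟩
    exact ⟨L, ⟨hL0, by omega⟩, i, ⟨hi0, by omega⟩, rfl⟩
  · rintro ⟨L, ⟨hL0, hL1⟩, i, ⟨hi0, hi1⟩, rfl⟩
    exact ⟨i, ⟨hi0, by omega⟩, L, ⟨hL0, by omega⟩, rfl⟩

theorem pv_go_nil (sub : List Char) (fuel acc : ℕ) :
    PySem.Chars.count.go sub fuel [] acc = acc := by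
  cases fuel <;> simp [PySem.Chars.count.go.eq_def]

theorem pv_go_shift (sub : List Char) : ∀ (fuel : ℕ) (l : List Char) (acc : ℕ),
    PySem.Chars.count.go sub fuel l acc = acc + PySem.Chars.count.go sub fuel l 0 := by
  intro fuel
  induction fuel with
  | zero => intro l acc; simp [PySem.Chars.count.go.eq_def]
  | succ fuel ih =>
    intro l acc
    cases l with
    | nil => simp [pv_go_nil]
    | cons h t =>
      rw [PySem.Chars.count.go.eq_def]
      conv_rhs => rw [PySem.Chars.count.go.eq_def]
      by_cases hp : sub.isPrefixOf (h :: t) = true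
      · simp only [hp, if_true]
        rw [ih _ (acc + 1), ih _ (0 + 1)]
        omega
      · simp only [hp]
        exact ih t acc

theorem pv_greedy_skip (L : Int) : ∀ (l : List Int) (c nxt : Int), (∀ i ∈ l, i < nxt) →
    l.foldl (fun st i => if st.2 ≤ i then (st.1 + 1, i + L) else st) (c, nxt) = (c, nxt) := by
  intro l
  induction l with
  | nil => intros; rfl
  | cons x t ih =>
    intro c nxt h
    have hx : x < nxt := h x (by simp)
    rw [List.foldl_cons, if_neg (by simp only; omega)]
    exact ih c nxt (fun i hi => h i (by simp [hi]))

theorem pv_range'_cons (a b : ℕ) (hb : 1 ≤ b) :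
    List.range' a b = a :: List.range' (a + 1) (b - 1) := by
  obtain ⟨b', rfl⟩ : ∃ b', b = b' + 1 := ⟨b - 1, by omega⟩
  simp [List.range'_succ]

-- the heart of the equivalence: the greedy left-to-right scan over the ascending list of
-- match positions computes exactly Python's non-overlapping str.count scan
theorem pv_go_greedy (s sub : List Char) (hne : sub ≠ []) :
    ∀ m : ℕ, ∀ (j fuel : ℕ) (c nxt : Int), j + m = s.length → m ≤ fuel → nxt ≤ (j : Int) →
    ((((List.range' j m).filter (fun i => sub.isPrefixOf (s.drop i))).map (fun i : ℕ => (i : Int))).foldl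
      (fun st i => if st.2 ≤ i then (st.1 + 1, i + (sub.length : Int)) else st) (c, nxt)).1
    = c + (PySem.Chars.count.go sub fuel (s.drop j) 0 : Int) := by
  intro m
  induction m using Nat.strong_induction_on with
  | _ m IH =>
  intro j fuel c nxt hjm hfuel hnxt
  rcases Nat.eq_zero_or_pos m with hm | hm
  · subst hm
    have hj : s.length ≤ j := by omega
    rw [List.drop_eq_nil_of_le hj]
    simp [pv_go_nil]
  · obtain ⟨fuel', rfl⟩ : ∃ f', fuel = f' + 1 := ⟨fuel - 1, by omega⟩
    have hjlt : j < s.length := by omega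
    have hdropjcons := List.drop_eq_getElem_cons hjlt
    have hL1 : 1 ≤ sub.length := List.length_pos_iff.mpr hne
    by_cases hpre : sub.isPrefixOf (s.drop j) = true
    · have hp := List.isPrefixOf_iff_prefix.mp hpre
      have hLle : sub.length ≤ m := by
        have := hp.length_le
        rw [List.length_drop] at this
        omega
      have hsplit : List.range' j m
          = List.range' j sub.length ++ List.range' (j + sub.length) (m - sub.length) := by
        have h := @List.range'_append j sub.length (m - sub.length) 1
        rw [one_mul] at h
        rw [h]
        congr 1
        omega
      rw [hsplit, List.filter_append, List.map_append, List.foldl_append,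
        pv_range'_cons j sub.length hL1]
      rw [show ((j :: List.range' (j + 1) (sub.length - 1)).filter
            (fun i => sub.isPrefixOf (s.drop i)))
          = j :: ((List.range' (j + 1) (sub.length - 1)).filter
            (fun i => sub.isPrefixOf (s.drop i))) by simp [hpre]]
      rw [List.map_cons, List.foldl_cons, if_pos (by simpa using hnxt)]
      have hmid : (((List.range' (j + 1) (sub.length - 1)).filter
            (fun i => sub.isPrefixOf (s.drop i))).map (fun i : ℕ => (i : Int))).foldl
          (fun st i => if st.2 ≤ i then (st.1 + 1, i + (sub.length : Int)) else st)
          ((c, nxt).1 + 1, (j : Int) + (sub.length : Int))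
          = ((c, nxt).1 + 1, (j : Int) + (sub.length : Int)) := by
        apply pv_greedy_skip
        intro i hi
        simp only [List.mem_map, List.mem_filter, List.mem_range'_1] at hi
        obtain ⟨a, ⟨⟨ha1, ha2⟩, _⟩, rfl⟩ := hi
        omega
      rw [hmid]
      have hIH := IH (m - sub.length) (by omega) (j + sub.length) fuel'
        ((c, nxt).1 + 1) ((j : Int) + (sub.length : Int)) (by omega) (by omega) (by push_cast; omega)
      simp only at hIH ⊢
      rw [hIH]
      have hpre' := hpre
      rw [hdropjcons] at hpre'
      rw [hdropjcons]
      conv_rhs => rw [PySem.Chars.count.go.eq_def]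
      simp only [hpre', if_true]
      rw [show List.drop sub.length (s[j] :: List.drop (j + 1) s)
            = List.drop (j + sub.length) s by rw [← hdropjcons, List.drop_drop]]
      rw [pv_go_shift sub fuel' _ (0 + 1)]
      push_cast
      ring
    · rw [pv_range'_cons j m hm]
      rw [show ((j :: List.range' (j + 1) (m - 1)).filter
            (fun i => sub.isPrefixOf (s.drop i)))
          = ((List.range' (j + 1) (m - 1)).filter
            (fun i => sub.isPrefixOf (s.drop i))) by simp [hpre]]
      rw [IH (m - 1) (by omega) (j + 1) fuel' c nxt (by omega) (by omega) (by push_cast; omega)]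
      have hpre' := hpre
      rw [hdropjcons] at hpre'
      rw [hdropjcons]
      conv_rhs => rw [PySem.Chars.count.go.eq_def]
      simp only [hpre', Bool.false_eq_true, if_false]

theorem pv_greedy_eq_count (s sub : List Char) (hne : sub ≠ []) (hle : sub.length ≤ s.length) :
    pvGreedy (sub.length : Int) (((List.range (s.length - sub.length + 1)).filter
        (fun i => sub.isPrefixOf (s.drop i))).map (fun i : ℕ => (i : Int)))
    = (PySem.Chars.count s sub : Int) := by
  have hL1 : 1 ≤ sub.length := List.length_pos_iff.mpr hne
  have hc : PySem.Chars.count s sub = PySem.Chars.count.go sub s.length s 0 := by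
    simp [PySem.Chars.count, hne]
  have main := pv_go_greedy s sub hne s.length 0 s.length 0 0 (by omega) (le_refl _) (by simp)
  simp only [List.drop_zero, Int.zero_add] at main
  have hfilter : (List.range (s.length - sub.length + 1)).filter (fun i => sub.isPrefixOf (s.drop i))
      = (List.range' 0 s.length).filter (fun i => sub.isPrefixOf (s.drop i)) := by
    have hsplit : List.range' 0 s.length = List.range' 0 (s.length - sub.length + 1)
        ++ List.range' (s.length - sub.length + 1) (s.length - (s.length - sub.length + 1)) := by
      have h := @List.range'_append 0 (s.length - sub.length + 1) (s.length - (s.length - sub.length + 1)) 1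
      rw [one_mul, Nat.zero_add] at h
      rw [h]
      congr 1
      omega
    rw [hsplit, List.filter_append, ← List.range_eq_range']
    have h2 : (List.range' (s.length - sub.length + 1) (s.length - (s.length - sub.length + 1))).filter
        (fun i => sub.isPrefixOf (s.drop i)) = [] := by
      rw [List.filter_eq_nil_iff]
      intro a ha
      rw [List.mem_range'_1] at ha
      intro hcontra
      have := (List.isPrefixOf_iff_prefix.mp hcontra).length_le
      rw [List.length_drop] at this
      omega
    rw [h2, List.append_nil]
  rw [pvGreedy, hfilter, main, hc]

-- the per-length body of B's outer loop adds exactly the pvF-sum over this length's patterns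
theorem pv_B_body (s : List Char) (L : Int) (hL3 : 3 ≤ L) (hL20 : L < 20) (total : Int) :
    (((PySem.List.pyRange 0 (PySem.Chars.len s - L + 1) 1).foldl
        (fun d i => d.modify (PySem.Chars.slice s (some i) (some (i + L))) [] (· ++ [i]))
        (PySem.Dict.empty : PySem.Dict (List Char) (List Int))).values.foldl
      (fun total pos => if 1 < pvGreedy L pos then total + (pvGreedy L pos - 1) else total) total)
    = total + ((PySem.Set.ofList (pvSubsAt s L)).map (pvF s)).sum := by
  by_cases hn : PySem.Chars.len s - L + 1 ≤ 0
  · have hempty : PySem.List.pyRange 0 (PySem.Chars.len s - L + 1) 1 = [] := by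
      rw [List.eq_nil_iff_forall_not_mem]
      intro i hi
      rw [PySem.List.mem_pyRange_one] at hi
      omega
    simp only [pvSubsAt, hempty, List.foldl_nil, List.map_nil]
    rw [show (PySem.Set.ofList ([] : List (List Char))) = [] from rfl]
    rw [show ((PySem.Dict.empty : PySem.Dict (List Char) (List Int)).values) = [] from rfl]
    simp
  · -- the grouping dict: keys are the distinct windows, value of a key its start positions
    have hkeys : ((PySem.List.pyRange 0 (PySem.Chars.len s - L + 1) 1).foldl
        (fun d i => d.modify (PySem.Chars.slice s (some i) (some (i + L))) [] (· ++ [i]))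
        (PySem.Dict.empty : PySem.Dict (List Char) (List Int))).keys
        = PySem.Set.ofList (pvSubsAt s L) := by
      rw [PySem.Dict.keys_foldl_modify_key _ (fun i => PySem.Chars.slice s (some i) (some (i + L))) []
        (fun _ x => (· ++ [x]))]
      rw [PySem.Set.ofList_eq_foldl]
      rfl
    have hnd : ((PySem.List.pyRange 0 (PySem.Chars.len s - L + 1) 1).foldl
        (fun d i => d.modify (PySem.Chars.slice s (some i) (some (i + L))) [] (· ++ [i]))
        (PySem.Dict.empty : PySem.Dict (List Char) (List Int))).keys.Nodup := by
      rw [hkeys]; exact PySem.Set.nodup_ofList _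
    have hvalues := PySem.Dict.values_eq_map_keys _ hnd ([] : List Int)
    have hgetD : ∀ p : List Char, ((PySem.List.pyRange 0 (PySem.Chars.len s - L + 1) 1).foldl
        (fun d i => d.modify (PySem.Chars.slice s (some i) (some (i + L))) [] (· ++ [i]))
        (PySem.Dict.empty : PySem.Dict (List Char) (List Int))).getD p []
        = (PySem.List.pyRange 0 (PySem.Chars.len s - L + 1) 1).filter
            (fun i => PySem.Chars.slice s (some i) (some (i + L)) == p) := by
      intro p
      rw [show ((PySem.List.pyRange 0 (PySem.Chars.len s - L + 1) 1).foldl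
          (fun d i => d.modify (PySem.Chars.slice s (some i) (some (i + L))) [] (· ++ [i]))
          (PySem.Dict.empty : PySem.Dict (List Char) (List Int)))
        = (((PySem.List.pyRange 0 (PySem.Chars.len s - L + 1) 1).map
            (fun i => (PySem.Chars.slice s (some i) (some (i + L)), i))).foldl
          (fun d pr => d.modify pr.1 [] (· ++ [pr.2]))
          (PySem.Dict.empty : PySem.Dict (List Char) (List Int))) from by rw [List.foldl_map]]
      rw [PySem.Dict.getD_foldl_modify_append]
      simp [List.filter_map, List.map_map, Function.comp_def]
    rw [hvalues, List.foldl_map, hkeys]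
    -- the loop over the values adds pvF for every distinct pattern
    rw [PySem.List.foldl_congr_mem _ _ (fun total p => total + pvF s p) total ?hcongr]
    · rw [PySem.List.foldl_add]
    case hcongr =>
      intro acc p hp
      rw [hgetD p]
      rw [PySem.Set.mem_ofList] at hp
      have hplen : p.length = L.toNat := pv_len_of_mem_subs s L (by omega) p hp
      have hpne : p ≠ [] := by
        intro h
        rw [h] at hplen
        simp at hplen
        omega
      have hLlen : L.toNat ≤ s.length := by
        simp only [PySem.Chars.len_eq] at hn
        omega
      have hkN : PySem.Chars.len s - L + 1 = ((s.length - L.toNat + 1 : ℕ) : Int) := by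
        simp only [PySem.Chars.len_eq]
        omega
      rw [hkN, PySem.List.pyRange_zero_natCast, List.filter_map]
      have hfc : (List.range (s.length - L.toNat + 1)).filter
            ((fun i => PySem.Chars.slice s (some i) (some (i + L)) == p) ∘ (fun k : ℕ => (k : Int)))
          = (List.range (s.length - L.toNat + 1)).filter (fun i => p.isPrefixOf (s.drop i)) := by
        apply List.filter_congr
        intro a ha
        rw [List.mem_range] at ha
        simp only [Function.comp_apply]
        rw [show ((a : Int) + L) = (((a + L.toNat : ℕ)) : Int) by omega,
          PySem.Chars.slice_eq_listSlice, PySem.List.slice_natCast,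
          show a + L.toNat - a = L.toNat by omega]
        rw [Bool.eq_iff_iff]
        simp only [beq_iff_eq, List.isPrefixOf_iff_prefix, List.prefix_iff_eq_take, hplen]
        constructor
        · intro h; exact h.symm
        · intro h; exact h.symm
      rw [hfc]
      rw [show L = ((p.length : ℕ) : Int) by omega]
      simp only [Int.toNat_natCast]
      rw [pv_greedy_eq_count s p hpne (by omega)]
      simp only [pvF]
      split
      · ring
      · omega

theorem pvB_eq_sum (s : List Char) :
    pvB s = ((PySem.List.pyRange 3 20 1).map
      (fun length => ((PySem.Set.ofList (pvSubsAt s length)).map (pvF s)).sum)).sum := by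
  rw [pvB]
  rw [PySem.List.foldl_congr_mem _ _
    (fun total L => total + ((PySem.Set.ofList (pvSubsAt s L)).map (pvF s)).sum) 0 ?h]
  · rw [PySem.List.foldl_add]
    exact Int.zero_add _
  case h =>
    intro acc L hL
    rw [PySem.List.mem_pyRange_one] at hL
    exact pv_B_body s L hL.1 hL.2 acc

theorem pv_sums_eq (s : List Char) :
    ((PySem.Set.ofList (pvAllA s)).map (pvF s)).sum =
    ((PySem.List.pyRange 3 20 1).map
      (fun length => ((PySem.Set.ofList (pvSubsAt s length)).map (pvF s)).sum)).sum := by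
  have hperm : (PySem.Set.ofList (pvAllA s)).Perm
      ((PySem.List.pyRange 3 20 1).flatMap (fun L => PySem.Set.ofList (pvSubsAt s L))) := by
    apply List.perm_of_nodup_nodup_toFinset_eq (PySem.Set.nodup_ofList _)
    · rw [List.nodup_flatMap]
      refine ⟨fun L _ => PySem.Set.nodup_ofList _, ?_⟩
      have : ∀ L ∈ PySem.List.pyRange 3 20 1, ∀ L' ∈ PySem.List.pyRange 3 20 1, L ≠ L' →
          Function.onFun List.Disjoint (fun L => PySem.Set.ofList (pvSubsAt s L)) L L' := by
        intro L hL L' hL' hne p hp hp'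
        rw [PySem.List.mem_pyRange_one] at hL hL'
        rw [PySem.Set.mem_ofList] at hp hp'
        have e1 := pv_len_of_mem_subs s L (by omega) p hp
        have e2 := pv_len_of_mem_subs s L' (by omega) p hp'
        omega
      exact List.Pairwise.imp_of_mem (fun {a b} ha hb h => this a ha b hb h)
        (by decide : (PySem.List.pyRange 3 20 1).Nodup)
    · ext p
      simp only [List.mem_toFinset, List.mem_flatMap, PySem.Set.mem_ofList]
      rw [pv_mem_allA_iff s p]
  rw [hperm.map (pvF s) |>.sum_eq]
  simp [List.flatMap_def, List.sum_flatten, List.map_map]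
  rfl

-- ===== VERDICT (by name: the statement is the Claim_ definition above) =====
theorem count_repeated_patterns_py_spec : Claim_equal_count_repeated_patterns_py := by
  intro content _
  show pvA content.toList = pvB content.toList
  rw [pvA_eq_sum, pvB_eq_sum, pv_sums_eq]
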